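-- pv_equiv track=rewrite | github.com/Akunesquik/Puissance4IA | TestsJeu/IA/recompenseAttaquant.py | longueur_chaine_verticale
-- ===== SOURCE A (Python) =====
-- def longueur_chaine_verticale(grille, ligne, colonne):
--     pion_joueur = grille[ligne][colonne]
--     longueur = 1  # Initialise la longueur à 1 (comprend le pion actuel)
--
--     # Recherche de l'alignement vers le bas
--     for i in range(ligne + 1, len(grille)):
--         if grille[i][colonne] == pion_joueur:
--             longueur += 1
--         else:
--             break
--
--     # Recherche de l'alignement vers le haut
--     for i in range(ligne - 1, -1, -1):
--         if grille[i][colonne] == pion_joueur: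
--             longueur += 1
--         else:
--             break
--
--     return recompense_longueur(longueur)
--
-- def recompense_longueur(longueur):
--     recompense = 0
--     if longueur == 1:
--         recompense = 0
--     elif longueur == 2:
--         recompense = 3
--     elif longueur == 3:
--         recompense = 7
--     else:
--         recompense = 500
--     return recompense
-- ===== SOURCE B (Python) =====
-- def longueur_chaine_verticale(grille, ligne, colonne):
--     # One top-to-bottom partition of the column into maximal runs; the run
--     # containing index `ligne` gives the chain length, mapped via a reward table.
--     col = [row[colonne] for row in grille]
--     start = 0
--     rest = col
--     while rest:
--         n = 1
--         while n < len(rest) and rest[n] == rest[0]: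
--             n += 1
--         if start <= ligne < start + n:
--             longueur = n
--             break
--         start += n
--         rest = rest[n:]
--     rewards = {1: 0, 2: 3, 3: 7}
--     return rewards.get(longueur, 500)
-- ===== Notes on version B (the rewrite author's own statement) =====
-- stated objective: alternative
-- what changed: Replaces A's two bidirectional early-break index scans from `ligne` with one top-to-bottom partition of the materialized column into maximal runs, taking the length of the run containing `ligne`, and replaces the if-chain by a reward dict lookup.
-- outside the precondition, e.g. on longueur_chaine_verticale([[1, 5], [2, 6], [3]], 0, 1): A returns 0, B raises IndexError; on longueur_chaine_verticale([[1], [1]], -1, 0): A returns 7, B raises UnboundLocalError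
import Mathlib
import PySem

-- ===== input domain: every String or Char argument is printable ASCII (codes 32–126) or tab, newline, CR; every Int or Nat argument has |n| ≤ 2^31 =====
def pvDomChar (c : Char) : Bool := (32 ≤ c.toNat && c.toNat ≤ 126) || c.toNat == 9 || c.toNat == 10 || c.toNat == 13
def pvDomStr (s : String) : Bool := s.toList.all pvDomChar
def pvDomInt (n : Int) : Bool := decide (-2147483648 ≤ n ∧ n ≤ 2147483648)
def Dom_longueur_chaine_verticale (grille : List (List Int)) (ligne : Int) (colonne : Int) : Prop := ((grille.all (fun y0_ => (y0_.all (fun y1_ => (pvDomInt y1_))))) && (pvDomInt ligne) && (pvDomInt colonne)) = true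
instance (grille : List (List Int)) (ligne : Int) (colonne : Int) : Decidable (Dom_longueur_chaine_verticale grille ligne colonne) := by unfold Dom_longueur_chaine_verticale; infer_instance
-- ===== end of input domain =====

-- B replaces A's two bidirectional early-break scans with one top-to-bottom run partition
-- of the column plus a reward-dict lookup (objective: alternative, same cost).

-- ===== PORT A =====
def recompense_longueur (longueur : Int) : Int :=
  if longueur == 1 then 0
  else if longueur == 2 then 3
  else if longueur == 3 then 7
  else 500

-- one of A's `for i in range(...)` loops with early break: walks the index list,
-- counts while grille[i][colonne] == pion, stops at the first mismatch
def pvScanA (grille : List (List Int)) (colonne pion : Int) : List Int → Int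
  | [] => 0
  | i :: rest =>
    match (PySem.List.pyGet? grille i).bind (fun row => PySem.List.pyGet? row colonne) with
    | some v => if v == pion then 1 + pvScanA grille colonne pion rest else 0
    | none => 0  -- IndexError in Python; outside Pre_

def longueur_chaine_verticale (grille : List (List Int)) (ligne : Int) (colonne : Int) : Int :=
  match (PySem.List.pyGet? grille ligne).bind (fun row => PySem.List.pyGet? row colonne) with
  | none => 0  -- IndexError in Python; outside Pre_
  | some pion =>
    let bas := pvScanA grille colonne pion (PySem.List.pyRange (ligne + 1) (grille.length : Int) 1)
    let haut := pvScanA grille colonne pion (PySem.List.pyRange (ligne - 1) (-1) (-1))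
    recompense_longueur (1 + bas + haut)

-- ===== PORT B =====
-- B's inner while: length of the maximal leading run of `rest` equal to its head `v`
def pvRunLen (v : Int) : List Int → Nat
  | [] => 0
  | x :: xs => if x == v then 1 + pvRunLen v xs else 0

-- B's outer while: walk the runs, return the length of the run containing `ligne`
def pvFindRun (ligne : Int) : List Int → Int → Int
  | [], _ => 0  -- Python B's loop falls through (UnboundLocalError); outside Pre_
  | v :: rest, start =>
    let k := pvRunLen v rest
    let n : Int := 1 + (k : Int)
    if start ≤ ligne ∧ ligne < start + n then n
    else pvFindRun ligne (rest.drop k) (start + n)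
termination_by xs => xs.length
decreasing_by simp only [List.length_drop, List.length_cons]; omega

def longueur_chaine_verticale_alt (grille : List (List Int)) (ligne : Int) (colonne : Int) : Int :=
  -- col = [row[colonne] for row in grille]; exact under Pre_ (colonne in range for every row)
  let col := grille.map (fun row => (PySem.List.pyGet? row colonne).getD 0)
  let longueur := pvFindRun ligne col 0
  PySem.Dict.getD (PySem.Dict.ofList [((1 : Int), (0 : Int)), (2, 3), (3, 7)]) longueur 500

-- ===== PRECONDITION & SPEC =====
-- Pre_ excludes inputs on which Python B raises: negative/out-of-range `ligne`
-- (where A's negative-index wraparound scan still returns a value) and grids with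
-- a row too short for `colonne` (B materializes the whole column; A may break early).
def Pre_longueur_chaine_verticale (grille : List (List Int)) (ligne : Int) (colonne : Int) : Prop :=
  0 ≤ ligne ∧ ligne < (grille.length : Int) ∧ ∀ row ∈ grille, PySem.Raise.InRange row.length colonne
instance (grille : List (List Int)) (ligne : Int) (colonne : Int) : Decidable (Pre_longueur_chaine_verticale grille ligne colonne) := by unfold Pre_longueur_chaine_verticale; infer_instance

def pvWitness_longueur_chaine_verticale : List (List Int) × Int × Int := ([[1, 2], [1, 3], [2, 3]], 1, 0)

def Spec_longueur_chaine_verticale (grille : List (List Int)) (ligne : Int) (colonne : Int) (out : Int) : Prop := out = longueur_chaine_verticale_alt grille ligne colonne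
instance (grille : List (List Int)) (ligne : Int) (colonne : Int) (out : Int) : Decidable (Spec_longueur_chaine_verticale grille ligne colonne out) := by unfold Spec_longueur_chaine_verticale; infer_instance

-- ===== CLAIM (what is proved, stated in full; the proofs are below) =====
def Claim_equal_longueur_chaine_verticale : Prop := ∀ (grille : List (List Int)) (ligne : Int) (colonne : Int), Dom_longueur_chaine_verticale grille ligne colonne → Pre_longueur_chaine_verticale grille ligne colonne → Spec_longueur_chaine_verticale grille ligne colonne (longueur_chaine_verticale grille ligne colonne)

-- ===== LEMMAS AND PROOFS =====

theorem pvRunLen_nil (v : Int) : pvRunLen v [] = 0 := rfl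

theorem pvRunLen_cons (v x : Int) (xs : List Int) :
    pvRunLen v (x :: xs) = if x = v then 1 + pvRunLen v xs else 0 := by
  simp [pvRunLen]

theorem pvRunLen_le (v : Int) (xs : List Int) : pvRunLen v xs ≤ xs.length := by
  induction xs with
  | nil => simp [pvRunLen_nil]
  | cons x xs ih => rw [pvRunLen_cons]; simp only [List.length_cons]; split_ifs <;> omega

theorem pvRunLen_getElem (v : Int) (xs : List Int) (i : Nat) (hi : i < pvRunLen v xs)
    (hl : i < xs.length) : xs[i] = v := by
  induction xs generalizing i with
  | nil => simp at hl
  | cons x xs ih =>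
    rw [pvRunLen_cons] at hi
    split_ifs at hi with hx
    · cases i with
      | zero => simpa using hx
      | succ j => exact ih j (by omega) (by simpa using hl)
    · omega

theorem pvRunLen_stop (v : Int) (xs : List Int) (i : Nat) (hi : i = pvRunLen v xs)
    (h : i < xs.length) : xs[i] ≠ v := by
  induction xs generalizing i with
  | nil => simp at h
  | cons x xs ih =>
    rw [pvRunLen_cons] at hi
    split_ifs at hi with hx
    · cases i with
      | zero => omega
      | succ j =>
        simp only [List.getElem_cons_succ]
        exact ih j (by omega) (by simpa using h)
    · subst hi; simpa using hx

theorem pvRunLen_zero_of_head (v w : Int) (xs : List Int) (h : xs.head? = some w) (hw : w ≠ v) :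
    pvRunLen v xs = 0 := by
  cases xs with
  | nil => simp at h
  | cons x xs =>
    simp only [List.head?_cons, Option.some.injEq] at h
    rw [pvRunLen_cons, if_neg (by rw [h]; exact hw)]

theorem pvRunLen_full (v : Int) (xs : List Int) (h : ∀ x ∈ xs, x = v) :
    pvRunLen v xs = xs.length := by
  induction xs with
  | nil => simp [pvRunLen_nil]
  | cons x xs ih =>
    rw [pvRunLen_cons, if_pos (h x (by simp))]
    have := ih (fun y hy => h y (by simp [hy]))
    simp only [List.length_cons]; omega

theorem pvRunLen_append (v : Int) (xs ys : List Int) :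
    pvRunLen v (xs ++ ys) =
      if pvRunLen v xs = xs.length then xs.length + pvRunLen v ys else pvRunLen v xs := by
  induction xs with
  | nil => simp [pvRunLen_nil]
  | cons x xs ih =>
    simp only [List.cons_append, List.length_cons]
    rw [pvRunLen_cons, pvRunLen_cons]
    by_cases hx : x = v
    · rw [if_pos hx, if_pos hx, ih]
      have := pvRunLen_le v xs
      split_ifs <;> omega
    · rw [if_neg hx, if_neg hx, if_neg (by omega)]

theorem pvRunLen_drop (v : Int) (xs : List Int) (i : Nat) (hi : i ≤ pvRunLen v xs) :
    pvRunLen v (xs.drop i) = pvRunLen v xs - i := by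
  induction i generalizing xs with
  | zero => simp
  | succ j ih =>
    cases xs with
    | nil => rw [pvRunLen_nil] at hi; omega
    | cons x xs =>
      rw [pvRunLen_cons] at hi ⊢
      split_ifs at hi ⊢ with hx
      · rw [List.drop_succ_cons, ih xs (by omega)]; omega
      · omega

theorem pvFindRun_eq (col : List Int) (idx : Nat) (start : Int) (h : idx < col.length) :
    pvFindRun (start + (idx : Int)) col start =
      1 + (pvRunLen col[idx] (col.drop (idx + 1)) : Int)
        + (pvRunLen col[idx] ((col.take idx).reverse) : Int) := by
  match col with
  | v :: rest =>
  rw [pvFindRun]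
  set k := pvRunLen v rest with hk
  have hkle : k ≤ rest.length := pvRunLen_le v rest
  have hlen : idx < 1 + rest.length := by simp only [List.length_cons] at h; omega
  have hcol : ∀ i, (hi : i < (v :: rest).length) → i ≤ k → (v :: rest)[i] = v := by
    intro i hi hik
    cases i with
    | zero => rfl
    | succ m =>
      simp only [List.getElem_cons_succ]
      exact pvRunLen_getElem v rest m (by omega) (by simp only [List.length_cons] at hi; omega)
  by_cases hcase : idx < 1 + k
  · rw [if_pos (by constructor <;> [omega; (push_cast; omega)])]
    have hv : (v :: rest)[idx] = v := hcol idx h (by omega)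
    rw [hv]
    have hdrop : pvRunLen v ((v :: rest).drop (idx + 1)) = k - idx := by
      rw [List.drop_succ_cons]
      exact pvRunLen_drop v rest idx (by omega)
    have htake : pvRunLen v (((v :: rest).take idx).reverse) = idx := by
      rw [pvRunLen_full]
      · simp only [List.length_reverse, List.length_take]; omega
      · intro x hx
        rw [List.mem_reverse] at hx
        obtain ⟨i, hi, rfl⟩ := List.mem_iff_getElem.mp hx
        simp only [List.length_take] at hi
        rw [List.getElem_take]
        exact hcol i (by simp only [List.length_cons]; omega) (by omega)
    rw [hdrop, htake]
    omega
  · rw [if_neg (by omega)]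
    obtain ⟨j, rfl⟩ : ∃ j, idx = 1 + k + j := ⟨idx - (1 + k), by omega⟩
    have hklen : k < rest.length := by omega
    have hrk : rest[k] ≠ v := pvRunLen_stop v rest k hk hklen
    have hlen' : j < (rest.drop k).length := by simp only [List.length_drop]; omega
    have harg : start + ((1 + k + j : Nat) : Int)
        = (start + (1 + (k : Int))) + (j : Int) := by push_cast; omega
    rw [harg, pvFindRun_eq (rest.drop k) j _ hlen']
    -- identify the pieces of (rest.drop k) with pieces of (v :: rest)
    have hw? : (rest.drop k)[j]? = (v :: rest)[1 + k + j]? := by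
      rw [List.getElem?_drop]
      have hix : 1 + k + j = (k + j) + 1 := by omega
      rw [hix, List.getElem?_cons_succ]
    have hw : (rest.drop k)[j]'hlen' = (v :: rest)[1 + k + j]'h := by
      rw [List.getElem?_eq_getElem hlen', List.getElem?_eq_getElem h] at hw?
      exact Option.some_inj.mp hw?
    have hdrop2 : (rest.drop k).drop (j + 1) = (v :: rest).drop (1 + k + j + 1) := by
      rw [List.drop_drop]
      have hix : 1 + k + j + 1 = (k + (j + 1)) + 1 := by omega
      rw [hix, List.drop_succ_cons]
    have htakesplit : (v :: rest).take (1 + k + j)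
        = (v :: rest).take (1 + k) ++ (rest.drop k).take j := by
      rw [List.take_add]
      congr 1
      have hix : 1 + k = k + 1 := by omega
      rw [hix, List.drop_succ_cons]
    rw [hw, hdrop2, htakesplit]
    rw [List.reverse_append, pvRunLen_append]
    -- the reverse of take (1 + k) starts with (v :: rest)[k] = v
    have hhead : (((v :: rest).take (1 + k)).reverse).head? = some v := by
      rw [List.head?_reverse, List.getLast?_eq_getElem?]
      have hl : ((v :: rest).take (1 + k)).length = 1 + k := by
        simp only [List.length_take, List.length_cons]; omega
      rw [hl]
      have hlt : (1 + k - 1) < ((v :: rest).take (1 + k)).length := by omega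
      rw [List.getElem?_eq_getElem hlt, List.getElem_take]
      exact congrArg some (hcol (1 + k - 1) (by simp only [List.length_cons]; omega) (by omega))
    split_ifs with hfull
    · -- the run below reaches the top of the dropped list, so the run value is rest[k] ≠ v
      have hd0 : (rest.drop k)[0]'(by simp only [List.length_drop]; omega) = rest[k] := by
        simp [List.getElem_drop]
      have hwne : (v :: rest)[1 + k + j]'h ≠ v := by
        rw [← hw]
        rcases Nat.eq_zero_or_pos j with h0 | h0
        · subst h0
          intro hc
          exact hrk (by rw [← hd0]; exact hc)
        · intro hc
          have hmem : (rest.drop k)[0]'(by simp only [List.length_drop]; omega)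
              ∈ ((rest.drop k).take j).reverse := by
            rw [List.mem_reverse]
            have he : (rest.drop k)[0]'(by simp only [List.length_drop]; omega)
                = ((rest.drop k).take j)[0]'(by simp only [List.length_take, List.length_drop]; omega) := by
              rw [List.getElem_take]
            rw [he]; exact List.getElem_mem _
          obtain ⟨i, hi, hieq⟩ := List.mem_iff_getElem.mp hmem
          have hiw : ((rest.drop k).take j).reverse[i] = (v :: rest)[1 + k + j]'h :=
            pvRunLen_getElem _ _ i (by omega) hi
          apply hrk
          rw [← hd0, ← hieq, hiw, ← hw]
          exact hc
      rw [pvRunLen_zero_of_head _ v _ hhead (fun hvw => hwne hvw.symm), hfull]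
      omega
    · omega
termination_by col.length
decreasing_by simp only [List.length_drop, List.length_cons]; omega

-- A's downward loop over range(j, len(grille)) counts the leading run of the dropped column
theorem scanA_down (g : List (List Int)) (c pion : Int)
    (H : ∀ row ∈ g, (PySem.List.pyGet? row c).isSome) (j : Nat) :
    pvScanA g c pion (PySem.List.pyRange (j : Int) (g.length : Int) 1)
      = (pvRunLen pion ((g.map (fun row => (PySem.List.pyGet? row c).getD 0)).drop j) : Int) := by
  set col := g.map (fun row => (PySem.List.pyGet? row c).getD 0) with hcol
  have hlen : col.length = g.length := List.length_map ..
  by_cases hj : j < g.length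
  · rw [PySem.List.pyRange_one_cons (by exact_mod_cast hj)]
    have hacc : (PySem.List.pyGet? g (j : Int)).bind (fun row => PySem.List.pyGet? row c)
        = some (col[j]'(by omega)) := by
      rw [PySem.List.pyGet?_natCast, List.getElem?_eq_getElem hj]
      simp only [Option.bind_some]
      obtain ⟨v, hv⟩ := Option.isSome_iff_exists.mp (H (g[j]) (List.getElem_mem hj))
      rw [hv]
      simp [hcol, List.getElem_map, hv]
    have hdropc : col.drop j = (col[j]'(by omega)) :: col.drop (j + 1) :=
      List.drop_eq_getElem_cons (by omega)
    rw [hdropc, pvRunLen_cons]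
    simp only [pvScanA, hacc]
    have hcast : (j : Int) + 1 = ((j + 1 : Nat) : Int) := by push_cast; ring
    rw [hcast, scanA_down g c pion H (j + 1)]
    by_cases he : col[j]'(by omega) = pion
    · rw [if_pos (by simpa using he), if_pos he]; push_cast; ring
    · rw [if_neg (by simpa using he), if_neg he]; rfl
  · rw [PySem.List.pyRange_one_eq_nil (by exact_mod_cast Nat.le_of_not_lt hj)]
    rw [List.drop_eq_nil_of_le (by omega)]
    rfl
termination_by g.length - j
decreasing_by omega

-- A's upward loop over range(j-1, -1, -1) counts the leading run of the reversed prefix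
theorem scanA_up (g : List (List Int)) (c pion : Int)
    (H : ∀ row ∈ g, (PySem.List.pyGet? row c).isSome) (j : Nat) (hj : j ≤ g.length) :
    pvScanA g c pion (PySem.List.pyRange ((j : Int) - 1) (-1) (-1))
      = (pvRunLen pion (((g.map (fun row => (PySem.List.pyGet? row c).getD 0)).take j).reverse) : Int) := by
  set col := g.map (fun row => (PySem.List.pyGet? row c).getD 0) with hcol
  have hlen : col.length = g.length := List.length_map ..
  induction j with
  | zero =>
    rw [PySem.List.pyRange_neg_one_eq_nil (by norm_num)]
    simp [pvScanA, pvRunLen_nil]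
  | succ j ih =>
    have hjl : j < g.length := by omega
    have hc1 : ((j + 1 : Nat) : Int) - 1 = (j : Int) := by push_cast; ring
    rw [hc1, PySem.List.pyRange_neg_one_cons (show (-1 : Int) < (j : Int) by omega)]
    have hacc : (PySem.List.pyGet? g (j : Int)).bind (fun row => PySem.List.pyGet? row c)
        = some (col[j]'(by omega)) := by
      rw [PySem.List.pyGet?_natCast, List.getElem?_eq_getElem hjl]
      simp only [Option.bind_some]
      obtain ⟨v, hv⟩ := Option.isSome_iff_exists.mp (H (g[j]) (List.getElem_mem hjl))
      rw [hv]
      simp [hcol, List.getElem_map, hv]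
    have htakec : (col.take (j + 1)).reverse = (col[j]'(by omega)) :: (col.take j).reverse := by
      rw [List.take_add_one, List.getElem?_eq_getElem (by omega), List.reverse_append]
      rfl
    rw [htakec, pvRunLen_cons]
    simp only [pvScanA, hacc]
    rw [ih (by omega)]
    by_cases he : col[j]'(by omega) = pion
    · rw [if_pos (by simpa using he), if_pos he]; push_cast; ring
    · rw [if_neg (by simpa using he), if_neg he]; rfl

-- A's if-chain and B's reward-dict lookup agree on every length
theorem reward_eq (L : Int) :
    recompense_longueur L
      = PySem.Dict.getD (PySem.Dict.ofList [((1 : Int), (0 : Int)), (2, 3), (3, 7)]) L 500 := by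
  unfold recompense_longueur
  by_cases h1 : L = 1
  · subst h1; decide
  by_cases h2 : L = 2
  · subst h2; decide
  by_cases h3 : L = 3
  · subst h3; decide
  rw [if_neg (by simpa using h1), if_neg (by simpa using h2), if_neg (by simpa using h3)]
  have e : PySem.Dict.ofList [((1 : Int), (0 : Int)), (2, 3), (3, 7)]
      = PySem.Dict.mk [((1 : Int), (0 : Int)), (2, 3), (3, 7)] := by decide
  rw [e]
  simp [PySem.Dict.getD, PySem.Dict.get?,
    show ¬ ((1 : Int) == L) = true by simpa using fun h => h1 h.symm,
    show ¬ ((2 : Int) == L) = true by simpa using fun h => h2 h.symm,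
    show ¬ ((3 : Int) == L) = true by simpa using fun h => h3 h.symm]

theorem longueur_chaine_verticale_spec : Claim_equal_longueur_chaine_verticale := by
  intro g l c _ hpre
  obtain ⟨h0, h1, h2⟩ := hpre
  unfold Spec_longueur_chaine_verticale longueur_chaine_verticale longueur_chaine_verticale_alt
  have H : ∀ row ∈ g, (PySem.List.pyGet? row c).isSome := by
    intro row hrow
    rw [Option.isSome_iff_ne_none]
    intro hn
    exact (PySem.List.pyGet?_eq_none_iff row c).mp hn (h2 row hrow)
  set col := g.map (fun row => (PySem.List.pyGet? row c).getD 0) with hcol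
  have hlen : col.length = g.length := List.length_map ..
  obtain ⟨idx, rfl⟩ : ∃ idx : Nat, l = (idx : Int) := ⟨l.toNat, (Int.toNat_of_nonneg h0).symm⟩
  have hidx : idx < g.length := by exact_mod_cast h1
  have hacc : (PySem.List.pyGet? g (idx : Int)).bind (fun row => PySem.List.pyGet? row c)
      = some (col[idx]'(by omega)) := by
    rw [PySem.List.pyGet?_natCast, List.getElem?_eq_getElem hidx]
    simp only [Option.bind_some]
    obtain ⟨v, hv⟩ := Option.isSome_iff_exists.mp (H (g[idx]) (List.getElem_mem hidx))
    rw [hv]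
    simp [hcol, List.getElem_map, hv]
  rw [hacc]
  dsimp only
  have hc1 : (idx : Int) + 1 = ((idx + 1 : Nat) : Int) := by push_cast; ring
  rw [hc1, scanA_down g c _ H (idx + 1), scanA_up g c _ H idx (by omega)]
  have hfr : pvFindRun (idx : Int) col 0
      = 1 + (pvRunLen (col[idx]'(by omega)) (col.drop (idx + 1)) : Int)
          + (pvRunLen (col[idx]'(by omega)) ((col.take idx).reverse) : Int) := by
    have := pvFindRun_eq col idx 0 (by omega)
    simpa using this
  rw [hfr, ← reward_eq]
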